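-- pv_equiv track=rewrite | github.com/interreg-nomade/imu-dcu-sensorModule-v1 | PythonScripts/Plot_orientation_all_sensors/functions.py | get_no_connected_sensors
-- ===== SOURCE A (Python) =====
-- def get_no_connected_sensors(y, total_number_of_data_rows, sensor_slot_data_available):
--     x = 0
--     for i in range(1, 7):
--         for j in range(total_number_of_data_rows):
--             if y[0][j] == i:
--                 sensor_slot_data_available[i - 1] = 1
--                 break
--     return sensor_slot_data_available.count(1)
-- ===== SOURCE B (Python) =====
-- def get_no_connected_sensors(y, total_number_of_data_rows, sensor_slot_data_available):
--     # one gather pass over the data (with early exit once all six sensors are seen),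
--     # then one fixed-size membership pass, instead of A's six repeated scans
--     seen = set()
--     for j in range(total_number_of_data_rows):
--         v = y[0][j]
--         if 1 <= v <= 6:
--             seen.add(v)
--             if len(seen) == 6:
--                 break
--     for i in range(1, 7):
--         if i in seen:
--             sensor_slot_data_available[i - 1] = 1
--     return sensor_slot_data_available.count(1)
-- ===== Notes on version B (the rewrite author's own statement) =====
-- stated objective: alternative
-- what changed: Replaces A's six separate scans of the data row (one per sensor id) with a single gather pass collecting the sensor values 1..6 into a set (with early exit once all six are seen), followed by one fixed six-element membership pass.
import Mathlib
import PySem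

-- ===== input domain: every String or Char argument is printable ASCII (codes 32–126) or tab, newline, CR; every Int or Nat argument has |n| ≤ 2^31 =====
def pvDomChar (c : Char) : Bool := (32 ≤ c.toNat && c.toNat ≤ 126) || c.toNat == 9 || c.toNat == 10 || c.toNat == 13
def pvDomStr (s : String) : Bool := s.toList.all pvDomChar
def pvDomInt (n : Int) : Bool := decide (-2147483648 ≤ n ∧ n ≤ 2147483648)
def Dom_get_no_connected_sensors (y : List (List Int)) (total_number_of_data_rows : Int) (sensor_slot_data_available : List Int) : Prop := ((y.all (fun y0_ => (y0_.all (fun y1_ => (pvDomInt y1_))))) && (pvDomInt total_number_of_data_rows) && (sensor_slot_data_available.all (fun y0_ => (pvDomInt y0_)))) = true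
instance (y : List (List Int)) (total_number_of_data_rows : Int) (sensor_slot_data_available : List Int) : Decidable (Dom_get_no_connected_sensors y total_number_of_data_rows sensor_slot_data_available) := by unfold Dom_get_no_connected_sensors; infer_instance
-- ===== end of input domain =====

-- B replaces A's six scans of the data row by one gather pass into a set (with early
-- exit once all six sensors are seen) plus one fixed six-element membership pass.
-- Both programs mutate sensor_slot_data_available identically; the theorem is about the return value.

-- ===== PORT A =====
-- A's inner loop 'for j in range(tot): if y[0][j] == i: ssd[i-1] = 1; break'.
-- y[0][j] is ported as pyGetD (default 0): indices out of range (IndexError) are excluded by Pre_,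
-- as is an out-of-range assignment ssd[i-1] = 1 (pySetD is its total form).
def gncsInner (row0 : List Int) (i : Int) (ssd : List Int) : List Int → List Int
  | [] => ssd
  | j :: rest =>
      if PySem.List.pyGetD row0 j 0 = i then PySem.List.pySetD ssd (i - 1) 1
      else gncsInner row0 i ssd rest

def get_no_connected_sensors (y : List (List Int)) (total_number_of_data_rows : Int) (sensor_slot_data_available : List Int) : Int :=
  let ssd' := (PySem.List.pyRange 1 7 1).foldl
    (fun acc i => gncsInner (y.headD []) i acc (PySem.List.pyRange 0 total_number_of_data_rows 1))
    sensor_slot_data_available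
  PySem.List.count ssd' 1

-- ===== PORT B =====
-- B's gather loop: for j in range(tot): v = y[0][j]; if 1 <= v <= 6: seen.add(v); if len(seen) == 6: break
def gncsGather (row0 : List Int) : PySem.Set Int → List Int → PySem.Set Int
  | seen, [] => seen
  | seen, j :: rest =>
      let v := PySem.List.pyGetD row0 j 0
      if 1 ≤ v ∧ v ≤ 6 then
        let seen' := PySem.Set.add seen v
        if PySem.Set.len seen' = 6 then seen'
        else gncsGather row0 seen' rest
      else gncsGather row0 seen rest

def get_no_connected_sensors_alt (y : List (List Int)) (total_number_of_data_rows : Int) (sensor_slot_data_available : List Int) : Int :=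
  let seen := gncsGather (y.headD []) PySem.Set.empty (PySem.List.pyRange 0 total_number_of_data_rows 1)
  let ssd' := (PySem.List.pyRange 1 7 1).foldl
    (fun acc i => if PySem.Set.contains seen i then PySem.List.pySetD acc (i - 1) 1 else acc)
    sensor_slot_data_available
  PySem.List.count ssd' 1

-- ===== PRECONDITION & SPEC =====
-- Pre_ = exactly the inputs where Python A returns (no IndexError): if the row count is positive,
-- y must be nonempty; every data index reached must be in range (the scan for a sensor missing from
-- the row reads past the end when tot > len(y[0])); and every sensor value found must have a slot.
def Pre_get_no_connected_sensors (y : List (List Int)) (total_number_of_data_rows : Int) (sensor_slot_data_available : List Int) : Prop :=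
  total_number_of_data_rows ≤ 0 ∨
    (y ≠ [] ∧
      (total_number_of_data_rows ≤ ((y.headD []).length : Int) ∨
        ∀ i ∈ ([1, 2, 3, 4, 5, 6] : List Int), i ∈ (y.headD [])) ∧
      ∀ i ∈ ([1, 2, 3, 4, 5, 6] : List Int),
        i ∈ (y.headD []).take total_number_of_data_rows.toNat →
          i ≤ (sensor_slot_data_available.length : Int))
instance (y : List (List Int)) (total_number_of_data_rows : Int) (sensor_slot_data_available : List Int) : Decidable (Pre_get_no_connected_sensors y total_number_of_data_rows sensor_slot_data_available) := by unfold Pre_get_no_connected_sensors; infer_instance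

def pvWitness_get_no_connected_sensors : List (List Int) × Int × List Int :=
  ([[3, 1, 3, 5]], 4, [0, 0, 0, 0, 0, 0])

def Spec_get_no_connected_sensors (y : List (List Int)) (total_number_of_data_rows : Int) (sensor_slot_data_available : List Int) (out : Int) : Prop := out = get_no_connected_sensors_alt y total_number_of_data_rows sensor_slot_data_available
instance (y : List (List Int)) (total_number_of_data_rows : Int) (sensor_slot_data_available : List Int) (out : Int) : Decidable (Spec_get_no_connected_sensors y total_number_of_data_rows sensor_slot_data_available out) := by unfold Spec_get_no_connected_sensors; infer_instance

-- ===== CLAIM (what is proved, stated in full; the proofs are below) =====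
def Claim_equal_get_no_connected_sensors : Prop := ∀ (y : List (List Int)) (total_number_of_data_rows : Int) (sensor_slot_data_available : List Int), Dom_get_no_connected_sensors y total_number_of_data_rows sensor_slot_data_available → Pre_get_no_connected_sensors y total_number_of_data_rows sensor_slot_data_available → Spec_get_no_connected_sensors y total_number_of_data_rows sensor_slot_data_available (get_no_connected_sensors y total_number_of_data_rows sensor_slot_data_available)

-- ===== LEMMAS AND PROOFS =====

-- A's inner scan sets slot i-1 exactly when some scanned index holds value i.
theorem gncsInner_eq (row0 : List Int) (i : Int) (ssd : List Int) :
    ∀ js : List Int, gncsInner row0 i ssd js =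
      if js.any (fun j => PySem.List.pyGetD row0 j 0 == i) then PySem.List.pySetD ssd (i - 1) 1 else ssd := by
  intro js
  induction js with
  | nil => simp [gncsInner]
  | cons j rest ih =>
      by_cases h : PySem.List.pyGetD row0 j 0 = i <;> simp [gncsInner, h, ih]

-- pigeonhole: six distinct values in {1,…,6} are all of them
theorem six_full (l : List Int) (hnd : l.Nodup) (hsub : ∀ z ∈ l, z ∈ ([1, 2, 3, 4, 5, 6] : List Int))
    (hlen : l.length = 6) (x : Int) (hx : x ∈ ([1, 2, 3, 4, 5, 6] : List Int)) : x ∈ l := by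
  have hsp : List.Subperm l ([1, 2, 3, 4, 5, 6] : List Int) := hnd.subperm hsub
  have hperm : List.Perm l ([1, 2, 3, 4, 5, 6] : List Int) := by
    refine hsp.perm_of_length_le ?_
    simp [hlen]
  exact hperm.mem_iff.mpr hx

-- gather-set membership: for a target value x ∈ {1,…,6}, x is in the gathered set
-- iff it was already in, or some scanned index holds x (the early break only fires
-- when the set already contains all of 1..6).
theorem gncsGather_mem (row0 : List Int) (x : Int) (hx : x ∈ ([1, 2, 3, 4, 5, 6] : List Int)) :
    ∀ (js : List Int) (seen : PySem.Set Int), seen.Nodup →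
      (∀ z ∈ seen, z ∈ ([1, 2, 3, 4, 5, 6] : List Int)) →
      (x ∈ gncsGather row0 seen js ↔
        x ∈ seen ∨ js.any (fun j => PySem.List.pyGetD row0 j 0 == x) = true) := by
  intro js
  induction js with
  | nil => intro seen _ _; simp [gncsGather]
  | cons j rest ih =>
      intro seen hnd hsub
      have hx16 : (1 : Int) ≤ x ∧ x ≤ 6 := by
        simp only [List.mem_cons, List.not_mem_nil, or_false] at hx
        rcases hx with h | h | h | h | h | h <;> omega
      by_cases hv : (1 : Int) ≤ PySem.List.pyGetD row0 j 0 ∧ PySem.List.pyGetD row0 j 0 ≤ 6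
      · have hvmem : PySem.List.pyGetD row0 j 0 ∈ ([1, 2, 3, 4, 5, 6] : List Int) := by
          rcases hv with ⟨h1, h2⟩
          interval_cases h : (PySem.List.pyGetD row0 j 0) <;> simp
        have hnd' : (PySem.Set.add seen (PySem.List.pyGetD row0 j 0)).Nodup :=
          PySem.Set.nodup_add _ _ hnd
        have hsub' : ∀ z ∈ PySem.Set.add seen (PySem.List.pyGetD row0 j 0),
            z ∈ ([1, 2, 3, 4, 5, 6] : List Int) := by
          intro z hz
          rcases (PySem.Set.mem_add _ _ _).mp hz with h | h
          · exact hsub z h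
          · exact h ▸ hvmem
        by_cases hlen : PySem.Set.len (PySem.Set.add seen (PySem.List.pyGetD row0 j 0)) = 6
        · have hlenc : (((PySem.Set.add seen (PySem.List.pyGetD row0 j 0)).length : Int) = 6) := by
            simpa [PySem.Set.len] using hlen
          have hres : gncsGather row0 seen (j :: rest) =
              PySem.Set.add seen (PySem.List.pyGetD row0 j 0) := by
            simp [gncsGather, hv, hlenc]
          have hlen' : (PySem.Set.add seen (PySem.List.pyGetD row0 j 0)).length = 6 := by
            exact_mod_cast hlenc
          have hmem : x ∈ PySem.Set.add seen (PySem.List.pyGetD row0 j 0) :=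
            six_full _ hnd' hsub' hlen' x hx
          rw [hres]
          constructor
          · intro _
            rcases (PySem.Set.mem_add _ _ _).mp hmem with h | h
            · exact Or.inl h
            · exact Or.inr (by simp [h])
          · intro _; exact hmem
        · have hlenc : ¬ (((PySem.Set.add seen (PySem.List.pyGetD row0 j 0)).length : Int) = 6) := by
            simpa [PySem.Set.len] using hlen
          have hres : gncsGather row0 seen (j :: rest) =
              gncsGather row0 (PySem.Set.add seen (PySem.List.pyGetD row0 j 0)) rest := by
            simp [gncsGather, hv, hlenc]
          rw [hres, ih _ hnd' hsub', PySem.Set.mem_add]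
          simp only [List.any_cons, Bool.or_eq_true, beq_iff_eq]
          constructor
          · rintro ((h | h) | h)
            · exact Or.inl h
            · exact Or.inr (Or.inl h.symm)
            · exact Or.inr (Or.inr h)
          · rintro (h | h | h)
            · exact Or.inl (Or.inl h)
            · exact Or.inl (Or.inr h.symm)
            · exact Or.inr h
      · have hres : gncsGather row0 seen (j :: rest) = gncsGather row0 seen rest := by
          simp [gncsGather, hv]
        have hne : ¬ (PySem.List.pyGetD row0 j 0 = x) := by
          intro h; rw [h] at hv; exact hv hx16
        rw [hres, ih _ hnd hsub]
        simp [hne]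

-- the gathered set of B agrees with A's per-sensor scan result on every i ∈ {1,…,6}
theorem contains_gather (row0 : List Int) (js : List Int) (i : Int)
    (hi : i ∈ ([1, 2, 3, 4, 5, 6] : List Int)) :
    PySem.Set.contains (gncsGather row0 PySem.Set.empty js) i =
      js.any (fun j => PySem.List.pyGetD row0 j 0 == i) := by
  have h := gncsGather_mem row0 i hi js PySem.Set.empty (by simp [PySem.Set.empty]) (by simp [PySem.Set.empty])
  simp only [PySem.Set.empty, List.not_mem_nil, false_or] at h
  by_cases hany : (js.any (fun j => PySem.List.pyGetD row0 j 0 == i)) = true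
  · rw [hany]
    exact (PySem.Set.contains_iff _ _).mpr (h.mpr hany)
  · simp only [Bool.not_eq_true] at hany
    rw [hany]
    by_contra hc
    have : PySem.Set.contains (gncsGather row0 PySem.Set.empty js) i = true := by
      revert hc
      cases PySem.Set.contains (gncsGather row0 PySem.Set.empty js) i <;> simp
    have := h.mp ((PySem.Set.contains_iff _ _).mp this)
    rw [hany] at this
    exact absurd this (by simp)

-- ===== VERDICT (by name: the statement is the Claim_ definition above) =====
theorem get_no_connected_sensors_spec : Claim_equal_get_no_connected_sensors := by
  intro y tot ssd _ _
  unfold Spec_get_no_connected_sensors get_no_connected_sensors get_no_connected_sensors_alt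
  dsimp only
  congr 2
  apply List.foldl_ext
  intro acc i hi
  have hi' : i ∈ ([1, 2, 3, 4, 5, 6] : List Int) := by
    have := (PySem.List.mem_pyRange_one).mp hi
    have h1 : (1 : Int) ≤ i := this.1
    have h2 : i < 7 := this.2
    interval_cases i <;> simp
  rw [gncsInner_eq, contains_gather _ _ _ hi']
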